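-- pv_equiv track=rewrite | github.com/RichterLProgram/CuraWay | backend/src/supply/citations.py | _find_row_evidence
-- ===== SOURCE A (Python) =====
-- from typing import Any, Dict, Iterable, List, Mapping, Optional, Tuple
--
-- def _short_quote(text: str, max_len: int = 200) -> str:
--     clipped = text.strip()
--     if len(clipped) <= max_len:
--         return clipped
--     return clipped[: max_len - 3].rstrip() + "..."
--
-- def _find_row_evidence(
--     name: str,
--     row_values: Mapping[str, str],
-- ) -> Tuple[Optional[str], Optional[str]]:
--     if not row_values or not name:
--         return None, None
--     target = name.strip().lower()
--     best_col = None
--     best_snippet = None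
--     for col, value in row_values.items():
--         if not value:
--             continue
--         text = str(value).strip()
--         if not text:
--             continue
--         if target in text.lower():
--             best_col = col
--             best_snippet = _short_quote(text)
--             break
--     if best_col is None:
--         for col, value in row_values.items():
--             if value:
--                 best_col = col
--                 best_snippet = _short_quote(str(value))
--                 break
--     return best_col, best_snippet
-- ===== SOURCE B (Python) =====
-- from typing import Mapping, Optional, Tuple
--
-- def _short_quote(text: str, max_len: int = 200) -> str:
--     clipped = text.strip()
--     if len(clipped) <= max_len:
--         return clipped
--     return clipped[: max_len - 3].rstrip() + "..."
--
-- def _find_row_evidence(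
--     name: str,
--     row_values: Mapping[str, str],
-- ) -> Tuple[Optional[str], Optional[str]]:
--     if not row_values or not name:
--         return None, None
--     target = name.strip().lower()
--     fallback = None
--     for col, value in row_values.items():
--         if value and fallback is None:
--             fallback = (col, _short_quote(str(value)))
--         text = str(value).strip()
--         if text and target in text.lower():
--             return col, _short_quote(text)
--     return fallback if fallback is not None else (None, None)
-- ===== Notes on version B (the rewrite author's own statement) =====
-- stated objective: simpler
-- what changed: Replaced A's two separate scans over row_values (one for a substring match with break, a second full scan for the fallback) by a single pass that records the first truthy value as fallback and returns immediately on the first match.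
import Mathlib
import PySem

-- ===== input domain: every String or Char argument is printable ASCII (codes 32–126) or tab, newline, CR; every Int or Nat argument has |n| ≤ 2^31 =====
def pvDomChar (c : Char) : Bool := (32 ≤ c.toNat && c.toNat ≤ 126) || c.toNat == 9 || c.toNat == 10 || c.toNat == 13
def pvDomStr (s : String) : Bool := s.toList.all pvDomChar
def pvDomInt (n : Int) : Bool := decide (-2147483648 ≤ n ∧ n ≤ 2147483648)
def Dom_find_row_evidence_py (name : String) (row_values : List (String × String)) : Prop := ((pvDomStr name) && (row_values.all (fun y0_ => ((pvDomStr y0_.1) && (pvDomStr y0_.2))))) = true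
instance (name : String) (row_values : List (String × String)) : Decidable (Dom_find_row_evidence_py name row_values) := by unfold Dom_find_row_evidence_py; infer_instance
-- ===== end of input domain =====

-- B replaces A's two separate scans (match scan with break, then a second fallback scan)
-- by one pass that records the first truthy value as fallback; objective: simpler.

-- shared helper: both Pythons define the identical _short_quote
def shortQuote (text : String) : String :=
  let clipped := PySem.Str.strip text
  if PySem.Str.len clipped ≤ 200 then clipped
  else PySem.Str.join "" [PySem.Str.rstrip (PySem.Str.slice clipped none (some 197)), "..."]

-- ===== PORT A =====
-- first loop: break on first value whose stripped text contains target
def aLoop1 (target : String) : List (String × String) → Option (String × String)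
  | [] => none
  | (col, value) :: rest =>
    if value = "" then aLoop1 target rest
    else
      let text := PySem.Str.strip value
      if text = "" then aLoop1 target rest
      else if PySem.Str.isIn target (PySem.Str.lower text) then some (col, shortQuote text)
      else aLoop1 target rest

-- second loop: first truthy value
def aLoop2 : List (String × String) → Option (String × String)
  | [] => none
  | (col, value) :: rest =>
    if value = "" then aLoop2 rest else some (col, shortQuote value)

def find_row_evidence_py (name : String) (row_values : List (String × String)) :
    Option String × Option String :=
  if row_values = [] ∨ name = "" then (none, none)
  else
    let target := PySem.Str.lower (PySem.Str.strip name)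
    match aLoop1 target row_values with
    | some (c, s) => (some c, some s)
    | none =>
      match aLoop2 row_values with
      | some (c, s) => (some c, some s)
      | none => (none, none)

-- ===== PORT B =====
-- single pass carrying the fallback (first truthy value); returns on first match
def bLoop (target : String) (fallback : Option (String × String)) :
    List (String × String) → Option String × Option String
  | [] =>
    match fallback with
    | some (c, s) => (some c, some s)
    | none => (none, none)
  | (col, value) :: rest =>
    let fallback' :=
      if value ≠ "" ∧ fallback = none then some (col, shortQuote value) else fallback
    let text := PySem.Str.strip value
    if text ≠ "" ∧ PySem.Str.isIn target (PySem.Str.lower text) then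
      (some col, some (shortQuote text))
    else bLoop target fallback' rest

def find_row_evidence_py_alt (name : String) (row_values : List (String × String)) :
    Option String × Option String :=
  if row_values = [] ∨ name = "" then (none, none)
  else bLoop (PySem.Str.lower (PySem.Str.strip name)) none row_values

-- ===== PRECONDITION & SPEC =====
def Spec_find_row_evidence_py (name : String) (row_values : List (String × String)) (out : Option String × Option String) : Prop := out = find_row_evidence_py_alt name row_values
instance (name : String) (row_values : List (String × String)) (out : Option String × Option String) : Decidable (Spec_find_row_evidence_py name row_values out) := by unfold Spec_find_row_evidence_py; infer_instance

-- ===== CLAIM (what is proved, stated in full; the proofs are below) =====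
def Claim_equal_find_row_evidence_py : Prop := ∀ (name : String) (row_values : List (String × String)), Dom_find_row_evidence_py name row_values → Spec_find_row_evidence_py name row_values (find_row_evidence_py name row_values)

-- ===== LEMMAS AND PROOFS =====

lemma strip_empty : PySem.Str.strip "" = "" := by decide

lemma bLoop_eq (target : String) (l : List (String × String))
    (fb : Option (String × String)) :
    bLoop target fb l =
      match aLoop1 target l with
      | some (c, s) => (some c, some s)
      | none =>
        match fb.orElse (fun _ => aLoop2 l) with
        | some (c, s) => (some c, some s)
        | none => (none, none) := by
  induction l generalizing fb with
  | nil =>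
    cases fb <;> simp [bLoop, aLoop1, aLoop2]
  | cons hd rest ih =>
    obtain ⟨col, value⟩ := hd
    by_cases hv : value = ""
    · subst hv
      simp [bLoop, aLoop1, aLoop2, strip_empty, ih]
    · by_cases ht : PySem.Str.strip value = ""
      · simp [bLoop, aLoop1, aLoop2, hv, ht, ih]
        cases fb <;> simp
      · by_cases hm : PySem.Chars.isIn target.toList (PySem.Chars.lower (PySem.Chars.strip value.toList)) = true
        · simp [bLoop, aLoop1, hv, ht, hm]
        · simp [bLoop, aLoop1, aLoop2, hv, ht, hm, ih]
          cases fb <;> simp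

-- ===== VERDICT (by name: the statement is the Claim_ definition above) =====
theorem find_row_evidence_py_spec : Claim_equal_find_row_evidence_py := by
  intro name row_values _
  unfold Spec_find_row_evidence_py find_row_evidence_py find_row_evidence_py_alt
  by_cases h : row_values = [] ∨ name = ""
  · simp [h]
  · simp only [h, if_false]
    rw [bLoop_eq]
    cases haL : aLoop1 (PySem.Str.lower (PySem.Str.strip name)) row_values with
    | some p => obtain ⟨c, s⟩ := p; simp
    | none =>
      simp
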